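-- pv_equiv track=rewrite | github.com/kgpatel05/SpeechFeatureGenerator | speechfeaturegenerator/features/entropy.py | compute_word_char_spans
-- ===== SOURCE A (Python) =====
-- def compute_word_char_spans(words):
--     """
--     Compute character spans for words in a sentence.
--
--     Args:
--         words: List of word strings
--
--     Returns:
--         List of (start, end) character position tuples
--     """
--     spans = []
--     pos = 0
--     for i, w in enumerate(words):
--         if i > 0:
--             pos += 1  # Space between words
--         start = pos
--         end = start + len(w)
--         spans.append((start, end))
--         pos = end
--     return spans
-- ===== SOURCE B (Python) =====
-- def compute_word_char_spans(words):
--     """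
--     Compute character spans for words in a sentence.
--
--     Args:
--         words: List of word strings
--
--     Returns:
--         List of (start, end) character position tuples
--     """
--     # Divide and conquer: spans of each half are computed independently
--     # (each relative to position 0), then the right half is shifted past
--     # the left half's sentence plus the separating space.
--     n = len(words)
--     if n == 0:
--         return []
--     if n == 1:
--         return [(0, len(words[0]))]
--     mid = n // 2
--     left = compute_word_char_spans(words[:mid])
--     right = compute_word_char_spans(words[mid:])
--     off = left[-1][1] + 1
--     return left + [(s + off, e + off) for s, e in right]
-- ===== Notes on version B (the rewrite author's own statement) =====
-- stated objective: alternative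
-- what changed: Replaces A's single left-to-right pass with a running position accumulator by a divide-and-conquer recursion: spans of each half are computed independently relative to 0, then the right half's spans are shifted past the left half's last end plus one space.
import Mathlib
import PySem

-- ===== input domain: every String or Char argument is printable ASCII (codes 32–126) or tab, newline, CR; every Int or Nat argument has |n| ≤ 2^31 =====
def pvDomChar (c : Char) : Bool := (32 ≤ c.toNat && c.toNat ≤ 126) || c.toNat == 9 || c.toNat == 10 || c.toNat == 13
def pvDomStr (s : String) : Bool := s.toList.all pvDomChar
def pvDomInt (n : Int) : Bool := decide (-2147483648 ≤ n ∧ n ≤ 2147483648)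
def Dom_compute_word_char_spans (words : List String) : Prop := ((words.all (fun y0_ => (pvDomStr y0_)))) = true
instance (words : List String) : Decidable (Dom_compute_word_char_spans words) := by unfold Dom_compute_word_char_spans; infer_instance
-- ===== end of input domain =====

-- B replaces A's single forward pass with a running position by a divide-and-conquer
-- recursion (halve, recurse, shift the right half); alternative decomposition, return values identical.

-- ===== PORT A =====
-- A: one loop over enumerate(words) carrying (spans, pos); +1 between words.
def compute_word_char_spans (words : List String) : List (Int × Int) :=
  ((PySem.List.enumerate words).foldl
    (fun (st : List (Int × Int) × Int) iw =>
      let pos := if iw.1 > 0 then st.2 + 1 else st.2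
      let start := pos
      let e := start + PySem.Str.len iw.2
      (st.1 ++ [(start, e)], e))
    ([], 0)).1

-- ===== PORT B =====
-- B: divide and conquer; words[:mid] / words[mid:] are List.take / List.drop.
-- pvCombine is B's 'left + shifted right' combining step; Python's left[-1] is ported as
-- getLastD (0,0): left is nonempty in every call (mid ≥ 1), so it is exact there.
def pvCombine (left right : List (Int × Int)) : List (Int × Int) :=
  left ++ right.map (fun p => (p.1 + ((left.getLastD (0, 0)).2 + 1), p.2 + ((left.getLastD (0, 0)).2 + 1)))

def compute_word_char_spans_alt (words : List String) : List (Int × Int) :=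
  if words.length = 0 then []
  else if words.length = 1 then [(0, PySem.Str.len (words.headD ""))]
  else
    pvCombine (compute_word_char_spans_alt (words.take (words.length / 2)))
              (compute_word_char_spans_alt (words.drop (words.length / 2)))
termination_by words.length
decreasing_by
  · simp only [List.length_take]; omega
  · simp only [List.length_drop]; omega

-- ===== PRECONDITION & SPEC =====
def Spec_compute_word_char_spans (words : List String) (out : List (Int × Int)) : Prop := out = compute_word_char_spans_alt words
instance (words : List String) (out : List (Int × Int)) : Decidable (Spec_compute_word_char_spans words out) := by unfold Spec_compute_word_char_spans; infer_instance

-- ===== CLAIM (what is proved, stated in full; the proofs are below) =====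
def Claim_equal_compute_word_char_spans : Prop := ∀ (words : List String), Dom_compute_word_char_spans words → Spec_compute_word_char_spans words (compute_word_char_spans words)

-- ===== LEMMAS AND PROOFS =====

-- Closed-form span list starting at position a: each word w gives (a, a+len w), next start a+len w+1.
def pvSpans (a : Int) : List String → List (Int × Int)
  | [] => []
  | w :: ws => (a, a + PySem.Str.len w) :: pvSpans (a + PySem.Str.len w + 1) ws

-- Total length of the words plus one separator each.
def pvS : List String → Int
  | [] => 0
  | w :: ws => PySem.Str.len w + 1 + pvS ws

-- A-side: folding the tail (all indices positive) appends pvSpans (pos+1) of the remaining words.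
theorem pvA_tail (l : List (Int × String)) (spans : List (Int × Int)) (pos : Int)
    (hpos : ∀ p ∈ l, p.1 > 0) :
    (l.foldl
      (fun (st : List (Int × Int) × Int) iw =>
        let p := if iw.1 > 0 then st.2 + 1 else st.2
        (st.1 ++ [(p, p + PySem.Str.len iw.2)], p + PySem.Str.len iw.2))
      (spans, pos)).1
    = spans ++ pvSpans (pos + 1) (l.map Prod.snd) := by
  induction l generalizing spans pos with
  | nil => simp [pvSpans]
  | cons hd tl ih =>
    have hhd : hd.1 > 0 := hpos hd (List.mem_cons_self)
    simp only [List.foldl_cons, List.map_cons, pvSpans]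
    rw [if_pos hhd, ih _ _ (fun p hp => hpos p (List.mem_cons_of_mem _ hp))]
    simp

-- A equals the closed form from 0.
theorem pvA_eq (words : List String) : compute_word_char_spans words = pvSpans 0 words := by
  cases words with
  | nil => rfl
  | cons w ws =>
    unfold compute_word_char_spans
    rw [PySem.List.enumerate_cons]
    simp only [List.foldl_cons]
    have h : ∀ p ∈ PySem.List.enumerate ws 1, p.1 > 0 := by
      intro p hp
      rcases (PySem.List.mem_enumerate_iff ws 1 p).1 hp with ⟨k, hk, rfl⟩
      positivity
    have := pvA_tail (PySem.List.enumerate ws 1)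
      [((0 : Int), (0 : Int) + PySem.Str.len w)] ((0 : Int) + PySem.Str.len w) h
    simp only [gt_iff_lt, lt_self_iff_false, if_false, List.nil_append, zero_add] at this ⊢
    rw [this, PySem.List.map_snd_enumerate]
    simp [pvSpans]

-- Shift lemma: pvSpans from a+c is pvSpans from a shifted by c.
theorem pvSpans_shift (ws : List String) (a c : Int) :
    pvSpans (a + c) ws = (pvSpans a ws).map (fun p => (p.1 + c, p.2 + c)) := by
  induction ws generalizing a with
  | nil => rfl
  | cons w t ih =>
    simp only [pvSpans, List.map_cons]
    rw [show a + c + PySem.Str.len w + 1 = (a + PySem.Str.len w + 1) + c by ring, ih]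
    rw [show a + c + PySem.Str.len w = a + PySem.Str.len w + c by ring]

-- Split lemma: pvSpans over an append splits at pvS of the left part.
theorem pvSpans_append (xs ys : List String) (a : Int) :
    pvSpans a (xs ++ ys) = pvSpans a xs ++ pvSpans (a + pvS xs) ys := by
  induction xs generalizing a with
  | nil => simp [pvSpans, pvS]
  | cons x t ih =>
    simp only [List.cons_append, pvSpans, pvS]
    rw [ih]
    ring_nf

-- Last end of a nonempty span list (any default).
theorem pvSpans_last (xs : List String) (hx : xs ≠ []) (a : Int) (d : Int × Int) :
    ((pvSpans a xs).getLastD d).2 = a + pvS xs - 1 := by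
  induction xs generalizing a d with
  | nil => exact absurd rfl hx
  | cons x t ih =>
    cases t with
    | nil => simp [pvSpans, pvS]; ring
    | cons y u =>
      have hstep : pvSpans a (x :: y :: u) = (a, a + PySem.Str.len x) :: pvSpans (a + PySem.Str.len x + 1) (y :: u) := rfl
      rw [hstep, List.getLastD_cons, ih (by simp) (a + PySem.Str.len x + 1)]
      simp [pvS]; ring

-- B equals the closed form from 0 (strong induction on length).
theorem pvB_eq_aux (n : Nat) : ∀ (words : List String), words.length ≤ n →
    compute_word_char_spans_alt words = pvSpans 0 words := by
  induction n with
  | zero =>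
    intro words h
    have : words = [] := List.eq_nil_of_length_eq_zero (Nat.le_zero.mp h)
    subst this
    rw [compute_word_char_spans_alt]; rfl
  | succ n ih =>
    intro words h
    rw [compute_word_char_spans_alt]
    by_cases h0 : words.length = 0
    · rw [if_pos h0]
      have : words = [] := List.eq_nil_of_length_eq_zero h0
      subst this; rfl
    · rw [if_neg h0]
      by_cases h1 : words.length = 1
      · rw [if_pos h1]
        cases words with
        | nil => simp at h1
        | cons w t =>
          cases t with
          | nil => simp [pvSpans]
          | cons y u => simp at h1
      · rw [if_neg h1]
        have h2 : 2 ≤ words.length := by omega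
        set mid := words.length / 2 with hmid
        have hmid1 : 1 ≤ mid := by omega
        have hmidlt : mid < words.length := by omega
        have htake : (words.take mid).length = mid := by
          simp [List.length_take]; omega
        have hdrop : (words.drop mid).length = words.length - mid := by
          simp [List.length_drop]
        rw [ih (words.take mid) (by omega), ih (words.drop mid) (by omega)]
        have htne : words.take mid ≠ [] := by
          intro hc; rw [hc] at htake; simp at htake; omega
        unfold pvCombine
        rw [pvSpans_last (words.take mid) htne 0 (0, 0)]
        have hoff : (0 : Int) + pvS (words.take mid) - 1 + 1 = pvS (words.take mid) := by ring
        rw [hoff]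
        have hsplit := pvSpans_append (words.take mid) (words.drop mid) 0
        rw [List.take_append_drop] at hsplit
        rw [hsplit, show (0 : Int) + pvS (words.take mid) = 0 + pvS (words.take mid) from rfl,
            pvSpans_shift (words.drop mid) 0 (pvS (words.take mid))]

theorem pvB_eq (words : List String) : compute_word_char_spans_alt words = pvSpans 0 words :=
  pvB_eq_aux words.length words (Nat.le_refl _)

-- ===== VERDICT (by name: the statement is the Claim_ definition above) =====
theorem compute_word_char_spans_spec : Claim_equal_compute_word_char_spans := by
  intro words _
  unfold Spec_compute_word_char_spans
  rw [pvA_eq, pvB_eq]
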